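-- pv_equiv track=rewrite | github.com/jihuncha/Data_Structure | com/codingTest/mobility/211121_test_1.py | solution
-- ===== SOURCE A (Python) =====
-- A = ['adam', 'eva', 'leo']
--
-- B= ['121212121', '111111111', '444555666']
--
-- P = '112'
--
-- def solution(A, B, P):
--
--     # dictionary로 생성 (번호 / 이름)
--     dic = dict(zip(B,A))
--     # key 로 임시 리스트 생성
--     temp_list = list(dic.keys())
--     # 결과를 담을 list
--     result_list = []
--
--     # P가 포함된 내용 확인
--     for i in temp_list:
--         if P in i:
--             result_list.append((dic[i],i))
--
--     # 해당 list가 없는 경우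
--     if len(result_list) == 0:
--         return "NO CONTACT"
--     # 해당 list 1개 인 경우
--     elif len(result_list) == 1:
--         return dic[result_list[0][1]]
--     # 여러개인 경우는 이름 순으로 정렬하여 가장 작은 값을 반환한다.
--     else:
--         result_list.sort()
--         return dic[result_list[0][1]]
--
--     pass
-- ===== SOURCE B (Python) =====
-- def solution(A, B, P):
--     # Same last-wins dedup and zip truncation as the original.
--     dic = dict(zip(B, A))
--     matches = [name for number, name in dic.items() if P in number]
--     return min(matches) if matches else "NO CONTACT"
-- ===== Notes on version B (the rewrite author's own statement) =====
-- stated objective: simpler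
-- what changed: Replaces the three-way length branch, the intermediate keys list and the collect-then-sort over (name, number) pairs with one comprehension over dict items plus a single min scan over the matching names.
import Mathlib
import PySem

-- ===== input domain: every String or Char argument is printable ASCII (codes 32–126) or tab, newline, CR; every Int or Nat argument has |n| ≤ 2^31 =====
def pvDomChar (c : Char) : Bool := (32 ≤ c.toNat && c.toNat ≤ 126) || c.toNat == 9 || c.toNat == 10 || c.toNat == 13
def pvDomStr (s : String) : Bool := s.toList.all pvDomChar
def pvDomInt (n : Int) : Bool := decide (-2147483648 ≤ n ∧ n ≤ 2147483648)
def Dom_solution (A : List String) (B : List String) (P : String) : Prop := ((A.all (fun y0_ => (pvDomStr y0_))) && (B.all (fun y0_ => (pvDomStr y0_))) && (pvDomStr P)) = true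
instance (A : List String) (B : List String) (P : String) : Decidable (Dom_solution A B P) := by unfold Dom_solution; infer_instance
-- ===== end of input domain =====

-- B replaces A's keys-list + collect-then-sort-then-relookup with one filter over dict items
-- and a single min scan over the matching names (objective: simpler).

-- ===== PORT A =====
-- dic[i] is ported as getD dic i "": every looked-up key is a key of dic, so no KeyError arises
-- and the default is never used. result_list[0] is pyGetD … 0 ("", ""), taken only under the
-- branch guaranteeing the list is non-empty, so the default is never used.
def solution (A : List String) (B : List String) (P : String) : String :=
  let dic := PySem.Dict.ofList (B.zip A)
  let temp_list := dic.keys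
  let result_list := temp_list.foldl
    (fun acc i => if PySem.Str.isIn P i then acc ++ [(dic.getD i "", i)] else acc) []
  if result_list.length == 0 then "NO CONTACT"
  else if result_list.length == 1 then
    dic.getD (PySem.List.pyGetD result_list 0 ("", "")).2 ""
  else
    let sorted_list := PySem.List.sorted2 result_list Prod.fst Prod.snd
    dic.getD (PySem.List.pyGetD sorted_list 0 ("", "")).2 ""

-- ===== PORT B =====
def solution_alt (A : List String) (B : List String) (P : String) : String :=
  let dic := PySem.Dict.ofList (B.zip A)
  let names := (dic.items.filter (fun p => PySem.Str.isIn P p.1)).map Prod.snd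
  match PySem.List.min? names (fun x => x) with
  | none => "NO CONTACT"
  | some m => m

-- ===== PRECONDITION & SPEC =====
def Spec_solution (A : List String) (B : List String) (P : String) (out : String) : Prop := out = solution_alt A B P
instance (A : List String) (B : List String) (P : String) (out : String) : Decidable (Spec_solution A B P out) := by unfold Spec_solution; infer_instance

-- ===== CLAIM (what is proved, stated in full; the proofs are below) =====
def Claim_equal_solution : Prop := ∀ (A : List String) (B : List String) (P : String), Dom_solution A B P → Spec_solution A B P (solution A B P)

-- ===== LEMMAS AND PROOFS =====

-- Python's tuple sort (sorted2 with fst/snd keys) is the stable sort under the lexicographic key.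
lemma sorted2_eq_sorted_lex (xs : List (String × String)) :
    PySem.List.sorted2 xs Prod.fst Prod.snd false
      = PySem.List.sorted xs (fun p => (toLex p : Lex (String × String))) false := by
  rw [PySem.List.sorted_eq_foldl_insertBy]
  show List.foldl (fun acc x => PySem.List.insertBy _ x acc) [] xs = _
  congr 1
  funext acc x
  congr 1
  funext a b
  by_cases h1 : a.1 < b.1
  · simp [h1, Prod.Lex.lt_iff, asymm h1]
  · by_cases h2 : b.1 < a.1
    · have : ¬ (toLex a < toLex b) := by
        rw [Prod.Lex.lt_iff]; push Not
        exact ⟨h1, fun h => absurd h (ne_of_gt h2)⟩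
      simp [h1, h2, this]
    · have he : a.1 = b.1 := le_antisymm (not_lt.mp h2) (not_lt.mp h1)
      simp [Prod.Lex.lt_iff, he]

-- A's append loop over the dict keys IS the filtered item list with components swapped.
lemma result_list_eq (d : PySem.Dict String String) (P : String) (hnd : d.keys.Nodup) :
    d.keys.foldl
        (fun acc i => if PySem.Str.isIn P i then acc ++ [(d.getD i "", i)] else acc) []
      = (d.items.filter (fun p => PySem.Str.isIn P p.1)).map (fun q => (q.2, q.1)) := by
  rw [PySem.List.foldl_append_if, List.nil_append]
  show ((d.items.map Prod.fst).filter _).map _ = _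
  rw [List.filter_map, List.map_map]
  apply List.map_congr_left
  intro q hq
  have hq' : q ∈ d.items := List.mem_of_mem_filter hq
  have : d.getD q.1 "" = q.2 :=
    PySem.Dict.getD_of_mem_items d (by rw [Prod.mk.eta]; exact hq') hnd ""
  simp [this]

theorem solution_spec : Claim_equal_solution := by
  intro A B P _
  unfold Spec_solution solution solution_alt
  simp only
  set d := PySem.Dict.ofList (B.zip A) with hd
  have hnd : d.keys.Nodup := PySem.Dict.nodup_keys_ofList _
  set F := d.items.filter (fun p => PySem.Str.isIn P p.1) with hF
  have hF_items : ∀ q ∈ F, q ∈ d.items := fun q hq => List.mem_of_mem_filter hq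
  rw [result_list_eq d P hnd, ← hF]
  match hFe : F with
  | [] =>
      rw [(PySem.List.min?_eq_none_iff (List.map Prod.snd ([] : List (String × String))) (fun x => x)).mpr rfl]
      simp
  | [q] =>
      have hqi : q ∈ d.items := hF_items q (by simp)
      have hg : d.getD q.1 "" = q.2 :=
        PySem.Dict.getD_of_mem_items d (by rw [Prod.mk.eta]; exact hqi) hnd ""
      simp [PySem.List.pyGetD_zero_cons, hg, PySem.List.min?_id_cons]
  | q1 :: q2 :: rest =>
      -- the sorted branch
      set R := ((q1 :: q2 :: rest).map (fun q => (q.2, q.1))) with hR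
      have hRne : R ≠ [] := by simp [hR]
      set key : String × String → Lex (String × String) := fun p => toLex p with hkey
      obtain ⟨m, t, hs⟩ : ∃ m t, PySem.List.sorted R key false = m :: t := by
        rcases hsr : PySem.List.sorted R key false with _ | ⟨m, t⟩
        · exact absurd ((PySem.List.sorted_eq_nil_iff R key false).mp hsr) hRne
        · exact ⟨m, t, rfl⟩
      have hmmem : m ∈ R := by
        rw [← PySem.List.mem_sorted R key false, hs]; exact List.mem_cons_self
      obtain ⟨q, hqF, hqm⟩ : ∃ q ∈ (q1 :: q2 :: rest), (q.2, q.1) = m := by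
        rw [hR] at hmmem; exact List.exists_of_mem_map hmmem
    -- A returns m.1
      have hqi : q ∈ d.items := hF_items q hqF
      have hgm : d.getD m.2 "" = m.1 := by
        rw [← hqm]
        exact PySem.Dict.getD_of_mem_items d (by rw [Prod.mk.eta]; exact hqi) hnd ""
      have hmin_le : ∀ y ∈ R, key m ≤ key y := PySem.List.key_head_sorted_le R key hs
      -- B returns min of the names
      obtain ⟨mn, hmn⟩ : ∃ mn,
          PySem.List.min? ((q1 :: q2 :: rest).map Prod.snd) (fun x => x) = some mn := by
        rcases h : PySem.List.min? ((q1 :: q2 :: rest).map Prod.snd) (fun x => x) with _ | mn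
        · simp [PySem.List.min?_eq_none_iff] at h
        · exact ⟨mn, rfl⟩
      have hmn_mem : mn ∈ (q1 :: q2 :: rest).map Prod.snd := PySem.List.min?_mem hmn
      have hmn_min : ∀ y ∈ (q1 :: q2 :: rest).map Prod.snd, mn ≤ y := by
        intro y hy; exact PySem.List.min?_isMin hmn y hy
      -- m.1 = mn
      have h1 : mn ≤ m.1 := hmn_min m.1 (by
        rw [← hqm]
        exact List.mem_map_of_mem hqF)
      have h2 : m.1 ≤ mn := by
        obtain ⟨q', hq'F, hq'mn⟩ := List.exists_of_mem_map hmn_mem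
        have : key m ≤ key (q'.2, q'.1) := hmin_le _ (by rw [hR]; exact List.mem_map_of_mem hq'F)
        have hfst : m.1 ≤ q'.2 := by
          rw [hkey, Prod.Lex.le_iff] at this
          rcases this with h | ⟨h, _⟩
          · exact le_of_lt h
          · exact le_of_eq h
        rw [← hq'mn]; exact hfst
      have hout : m.1 = mn := le_antisymm h2 h1
      rw [if_neg (by simp [hR]), if_neg (by simp [hR]), sorted2_eq_sorted_lex, ← hkey, hs,
        PySem.List.pyGetD_zero_cons, hmn]
      exact hgm.trans hout
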